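-- pv_equiv track=rewrite | github.com/weeklyweights-a11y/Context-engine | backend/app/services/csv_service.py | detect_feedback_columns
-- ===== SOURCE A (Python) =====
-- FEEDBACK_HEADER_MAP: dict[str, list[str]] = {
--     "text": [
--         "feedback", "message", "text", "description", "content", "body",
--         "comment", "note", "review", "request",
--     ],
--     "source": ["source", "source_type", "channel", "origin", "type"],
--     "product_area": ["area", "product_area", "module", "feature", "category", "topic"],
--     "customer_name": ["company", "customer", "organization", "org", "account", "company_name"],
--     "author_name": ["name", "author", "user", "reviewer", "submitter"],
--     "author_email": ["email", "customer_email", "user_email", "contact_email"],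
--     "date": ["date", "created", "created_at", "timestamp", "time", "submitted"],
--     "sentiment": ["sentiment", "tone", "feeling"],
--     "rating": ["rating", "score", "stars", "nps"],
-- }
--
-- def _match_header(our_field: str, headers: list[str], mapping: dict[str, list[str]]) -> str | None:
--     """Match CSV header to our field using keyword mapping. Case-insensitive.
--     Tries exact match first, then partial (header contains keyword or keyword in header words).
--     """
--     keywords = mapping.get(our_field, [])
--     keywords_lower = {k.lower() for k in keywords}
--     for h in headers:
--         if not h:
--             continue
--         h_clean = h.strip().lower()
--         if h_clean in keywords_lower:
--             return h.strip()
--         # Partial match: header contains keyword, or any header word matches a keyword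
--         for kw in keywords_lower:
--             if kw in h_clean:
--                 return h.strip()
--         words = h_clean.replace("-", " ").replace("_", " ").split()
--         if any(w in keywords_lower for w in words):
--             return h.strip()
--     return None
--
-- def detect_feedback_columns(headers: list[str]) -> dict[str, str | None]:
--     """Auto-map CSV headers to feedback fields. Returns dict of our_field -> csv_column."""
--     result: dict[str, str | None] = {}
--     for our_field in FEEDBACK_HEADER_MAP:
--         matched = _match_header(our_field, headers, FEEDBACK_HEADER_MAP)
--         result[our_field] = matched
--     # Fallback: use first column for text if nothing matched (avoids stuck pending uploads)
--     first = next((h.strip() for h in headers if h and h.strip()), None)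
--     if first and not result.get("text"):
--         result["text"] = first
--     return result
-- ===== SOURCE B (Python) =====
-- # B: single header-major pass with greedy per-field assignment, instead of A's
-- # field-major repeated scans of the header list. Same return value.
--
-- FEEDBACK_HEADER_MAP: dict[str, list[str]] = {
--     "text": [
--         "feedback", "message", "text", "description", "content", "body",
--         "comment", "note", "review", "request",
--     ],
--     "source": ["source", "source_type", "channel", "origin", "type"],
--     "product_area": ["area", "product_area", "module", "feature", "category", "topic"],
--     "customer_name": ["company", "customer", "organization", "org", "account", "company_name"],
--     "author_name": ["name", "author", "user", "reviewer", "submitter"],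
--     "author_email": ["email", "customer_email", "user_email", "contact_email"],
--     "date": ["date", "created", "created_at", "timestamp", "time", "submitted"],
--     "sentiment": ["sentiment", "tone", "feeling"],
--     "rating": ["rating", "score", "stars", "nps"],
-- }
--
--
-- def _hits(kws: list[str], hc: str, words: list[str]) -> bool:
--     """Does a header (stripped+lowered hc, with word list words) match a lowered keyword list?"""
--     if hc in kws:
--         return True
--     for k in kws:
--         if k in hc:
--             return True
--     for w in words:
--         if w in kws:
--             return True
--     return False
--
--
-- def detect_feedback_columns(headers: list[str]) -> dict[str, str | None]:
--     # state: one (field, lowered keywords, assignment) triple per field, in map order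
--     state = [(f, [k.lower() for k in kws], None) for f, kws in FEEDBACK_HEADER_MAP.items()]
--     for h in headers:
--         if all(cur is not None for _, _, cur in state):
--             break
--         if not h:
--             continue
--         hs = h.strip()
--         hc = hs.lower()
--         words = hc.replace("-", " ").replace("_", " ").split()
--         state = [
--             (f, kws, cur if cur is not None else (hs if _hits(kws, hc, words) else None))
--             for f, kws, cur in state
--         ]
--     result: dict[str, str | None] = {f: cur for f, _, cur in state}
--     first = next((h.strip() for h in headers if h and h.strip()), None)
--     if first and not result.get("text"):
--         result["text"] = first
--     return result
-- ===== Notes on version B (the rewrite author's own statement) =====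
-- stated objective: alternative
-- what changed: Inverted the nesting: instead of A's field-major loop that re-scans the whole header list once per field via _match_header, B makes a single header-major pass, greedily assigning each header to every still-unassigned field and stopping once all fields are assigned, then applies the same text fallback.
import Mathlib
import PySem

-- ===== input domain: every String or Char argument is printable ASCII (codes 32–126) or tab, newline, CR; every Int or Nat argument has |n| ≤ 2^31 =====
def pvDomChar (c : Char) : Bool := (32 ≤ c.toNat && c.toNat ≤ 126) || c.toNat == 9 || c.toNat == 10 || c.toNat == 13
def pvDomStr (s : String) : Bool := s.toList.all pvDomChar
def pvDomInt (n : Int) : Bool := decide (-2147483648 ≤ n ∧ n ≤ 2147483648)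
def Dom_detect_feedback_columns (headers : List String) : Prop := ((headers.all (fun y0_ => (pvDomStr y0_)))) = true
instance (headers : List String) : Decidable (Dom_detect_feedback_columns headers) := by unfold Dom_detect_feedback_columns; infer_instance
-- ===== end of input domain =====

-- B replaces A's field-major repeated scans of the headers by a single header-major pass
-- with greedy per-field assignment (objective: alternative decomposition, same result).

-- the module constant FEEDBACK_HEADER_MAP (insertion order)
def pvFeedbackHeaderMap : List (String × List String) := [
  ("text", ["feedback", "message", "text", "description", "content", "body",
            "comment", "note", "review", "request"]),
  ("source", ["source", "source_type", "channel", "origin", "type"]),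
  ("product_area", ["area", "product_area", "module", "feature", "category", "topic"]),
  ("customer_name", ["company", "customer", "organization", "org", "account", "company_name"]),
  ("author_name", ["name", "author", "user", "reviewer", "submitter"]),
  ("author_email", ["email", "customer_email", "user_email", "contact_email"]),
  ("date", ["date", "created", "created_at", "timestamp", "time", "submitted"]),
  ("sentiment", ["sentiment", "tone", "feeling"]),
  ("rating", ["rating", "score", "stars", "nps"])]

-- Python truthiness of an Optional[str]
def pvTruthyOptStr (o : Option String) : Bool :=
  match o with
  | some s => !(s == "")
  | none => false

-- ===== PORT A =====
-- the 'for h in headers' loop of _match_header (early return = stop recursion)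
def pvMatchHeaderLoop (keywordsLower : PySem.Set String) (headers : List String) : Option String :=
  match headers with
  | [] => none
  | h :: rest =>
    if h = "" then pvMatchHeaderLoop keywordsLower rest
    else
      let hClean := PySem.Str.lower (PySem.Str.strip h)
      if PySem.Set.contains keywordsLower hClean then some (PySem.Str.strip h)
      else if keywordsLower.any (fun kw => PySem.Str.isIn kw hClean) then some (PySem.Str.strip h)
      else if (PySem.Str.split₀ (PySem.Str.replace (PySem.Str.replace hClean "-" " ") "_" " ")).any
                (fun w => PySem.Set.contains keywordsLower w) then some (PySem.Str.strip h)
      else pvMatchHeaderLoop keywordsLower rest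

def pvMatchHeader (our_field : String) (headers : List String)
    (mapping : PySem.Dict String (List String)) : Option String :=
  let keywords := (mapping.get? our_field).getD []
  let keywordsLower := PySem.Set.ofList (keywords.map PySem.Str.lower)
  pvMatchHeaderLoop keywordsLower headers

def detect_feedback_columns (headers : List String) : List (String × Option String) :=
  let mapping : PySem.Dict String (List String) := PySem.Dict.mk pvFeedbackHeaderMap
  -- 'for our_field in FEEDBACK_HEADER_MAP: result[our_field] = _match_header(...)'
  let result : PySem.Dict String (Option String) :=
    pvFeedbackHeaderMap.foldl
      (fun r p => r.insert p.1 (pvMatchHeader p.1 headers mapping))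
      (PySem.Dict.mk [])
  let first : Option String :=
    headers.findSome? (fun h => if h ≠ "" ∧ PySem.Str.strip h ≠ "" then some (PySem.Str.strip h) else none)
  let result :=
    if pvTruthyOptStr first && !pvTruthyOptStr ((result.get? "text").getD none) then
      result.insert "text" first
    else result
  result.items

-- ===== PORT B =====
-- does a header (stripped+lowered hc, word list 'words') match a lowered keyword list?
def pvHits (kws : List String) (hc : String) (words : List String) : Bool :=
  if kws.contains hc then true
  else if kws.any (fun k => PySem.Str.isIn k hc) then true
  else if words.any (fun w => kws.contains w) then true
  else false

-- one header of B's single pass: try to assign it to every still-unassigned field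
def pvStepB (st : List (String × List String × Option String)) (h : String) :
    List (String × List String × Option String) :=
  if h = "" then st
  else
    let hs := PySem.Str.strip h
    let hc := PySem.Str.lower hs
    let words := PySem.Str.split₀ (PySem.Str.replace (PySem.Str.replace hc "-" " ") "_" " ")
    st.map (fun e =>
      (e.1, e.2.1,
        match e.2.2 with
        | some v => some v
        | none => if pvHits e.2.1 hc words then some hs else none))

-- 'if all(cur is not None ...): break'
def pvDone (st : List (String × List String × Option String)) : Bool :=
  st.all (fun e => e.2.2.isSome)

-- B's header loop, stopping early once every field is assigned
def pvLoopB (headers : List String) (st : List (String × List String × Option String)) :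
    List (String × List String × Option String) :=
  match headers with
  | [] => st
  | h :: rest => if pvDone st then st else pvLoopB rest (pvStepB st h)

def detect_feedback_columns_alt (headers : List String) : List (String × Option String) :=
  let state0 : List (String × List String × Option String) :=
    pvFeedbackHeaderMap.map (fun p => (p.1, p.2.map PySem.Str.lower, (none : Option String)))
  let state := pvLoopB headers state0
  let result : PySem.Dict String (Option String) := PySem.Dict.mk (state.map (fun e => (e.1, e.2.2)))
  let first : Option String :=
    headers.findSome? (fun h => if h ≠ "" ∧ PySem.Str.strip h ≠ "" then some (PySem.Str.strip h) else none)
  let result :=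
    if pvTruthyOptStr first && !pvTruthyOptStr ((result.get? "text").getD none) then
      result.insert "text" first
    else result
  result.items

-- ===== PRECONDITION & SPEC =====
def Spec_detect_feedback_columns (headers : List String) (out : List (String × Option String)) : Prop := out = detect_feedback_columns_alt headers
instance (headers : List String) (out : List (String × Option String)) : Decidable (Spec_detect_feedback_columns headers out) := by unfold Spec_detect_feedback_columns; infer_instance

-- ===== CLAIM (what is proved, stated in full; the proofs are below) =====
def Claim_equal_detect_feedback_columns : Prop := ∀ (headers : List String), Dom_detect_feedback_columns headers → Spec_detect_feedback_columns headers (detect_feedback_columns headers)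

-- ===== LEMMAS AND PROOFS =====

theorem pvStepB_of_done (st : List (String × List String × Option String)) (h : String)
    (hd : pvDone st = true) : pvStepB st h = st := by
  unfold pvStepB
  split_ifs with hh
  · rfl
  · conv_rhs => rw [← List.map_id st]
    apply List.map_congr_left
    intro e he
    obtain ⟨f, kws, cur⟩ := e
    have he2 := List.all_eq_true.mp hd _ he
    obtain ⟨v, hv⟩ := Option.isSome_iff_exists.mp he2
    simp only at hv
    simp [hv]

theorem foldl_pvStepB_of_done (headers : List String) (st : List (String × List String × Option String))
    (hd : pvDone st = true) : headers.foldl pvStepB st = st := by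
  induction headers with
  | nil => rfl
  | cons h rest ih => rw [List.foldl_cons, pvStepB_of_done st h hd, ih]

theorem pvLoopB_eq_foldl (headers : List String) (st : List (String × List String × Option String)) :
    pvLoopB headers st = headers.foldl pvStepB st := by
  induction headers generalizing st with
  | nil => rfl
  | cons h rest ih =>
    simp only [pvLoopB]
    by_cases hd : pvDone st = true
    · rw [if_pos hd, List.foldl_cons, pvStepB_of_done st h hd, foldl_pvStepB_of_done rest st hd]
    · rw [if_neg hd, List.foldl_cons, ih]

-- B's per-header step, restricted to one field
def pvStepF (kws : List String) (cur : Option String) (h : String) : Option String :=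
  if h = "" then cur
  else
    match cur with
    | some v => some v
    | none =>
      if pvHits kws (PySem.Str.lower (PySem.Str.strip h))
          (PySem.Str.split₀ (PySem.Str.replace (PySem.Str.replace (PySem.Str.lower (PySem.Str.strip h)) "-" " ") "_" " "))
        then some (PySem.Str.strip h) else none

theorem pvStepB_eq (st : List (String × List String × Option String)) (h : String) :
    pvStepB st h = st.map (fun e => (e.1, e.2.1, pvStepF e.2.1 e.2.2 h)) := by
  unfold pvStepB pvStepF
  split_ifs with hh
  · simp
  · rfl

theorem foldl_pvStepB (headers : List String) (st : List (String × List String × Option String)) :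
    headers.foldl pvStepB st
      = st.map (fun e => (e.1, e.2.1, headers.foldl (pvStepF e.2.1) e.2.2)) := by
  induction headers generalizing st with
  | nil => simp
  | cons h rest ih =>
    simp only [List.foldl_cons, pvStepB_eq, ih, List.map_map]
    rfl

theorem foldl_pvStepF_some (kws : List String) (headers : List String) (v : String) :
    headers.foldl (pvStepF kws) (some v) = some v := by
  induction headers with
  | nil => rfl
  | cons h rest ih =>
    simp only [List.foldl_cons]
    by_cases hh : h = "" <;> simp [pvStepF, hh, ih]

theorem set_contains_ofList (l : List String) (x : String) :
    PySem.Set.contains (PySem.Set.ofList l) x = l.contains x := by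
  rw [Bool.eq_iff_iff]
  simp [PySem.Set.contains, PySem.Set.mem_ofList]

theorem set_any_ofList (l : List String) (p : String → Bool) :
    (PySem.Set.ofList l).any p = l.any p := by
  rw [Bool.eq_iff_iff]
  simp only [List.any_eq_true]
  constructor
  · rintro ⟨x, hx, hp⟩; exact ⟨x, (PySem.Set.mem_ofList l x).mp hx, hp⟩
  · rintro ⟨x, hx, hp⟩; exact ⟨x, (PySem.Set.mem_ofList l x).mpr hx, hp⟩

-- A's per-field scan of the headers equals B's per-field residue of the single pass
theorem matchLoop_eq_foldF (kws : List String) (headers : List String) :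
    pvMatchHeaderLoop (PySem.Set.ofList kws) headers = headers.foldl (pvStepF kws) none := by
  induction headers with
  | nil => rfl
  | cons h rest ih =>
    simp only [List.foldl_cons]
    by_cases hh : h = ""
    · simp [pvMatchHeaderLoop, pvStepF, hh, ih]
    · simp only [pvMatchHeaderLoop, pvStepF, if_neg hh]
      simp only [set_contains_ofList, set_any_ofList]
      cases h1 : kws.contains (PySem.Str.lower (PySem.Str.strip h)) <;>
      cases h2 : kws.any (fun kw => PySem.Str.isIn kw (PySem.Str.lower (PySem.Str.strip h))) <;>
      cases h3 : (PySem.Str.split₀ (PySem.Str.replace (PySem.Str.replace (PySem.Str.lower (PySem.Str.strip h)) "-" " ") "_" " ")).any (fun w => kws.contains w) <;>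
      simp only [pvHits, h1, h2, h3,         Bool.false_eq_true, if_true, if_false, ih, foldl_pvStepF_some]

-- both pre-fallback results, as association lists over the map's fields
theorem core_eq (headers : List String) :
    (pvFeedbackHeaderMap.foldl
        (fun r p => r.insert p.1 (pvMatchHeader p.1 headers (PySem.Dict.mk pvFeedbackHeaderMap)))
        (PySem.Dict.mk []))
      = PySem.Dict.mk
          ((headers.foldl pvStepB
              (pvFeedbackHeaderMap.map (fun p => (p.1, p.2.map PySem.Str.lower, (none : Option String))))).map
            (fun e => (e.1, e.2.2))) := by
  apply PySem.Dict.ext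
  rw [PySem.Dict.items_foldl_insert_fresh]
  · rw [foldl_pvStepB]
    simp only [List.map_map, List.nil_append]
    show _ = pvFeedbackHeaderMap.map _
    apply List.map_congr_left
    intro p hp
    simp only [Function.comp]
    have hget : (PySem.Dict.mk pvFeedbackHeaderMap).get? p.1 = some p.2 := by
      apply PySem.Dict.get?_of_mem_items
      · exact hp
      · decide
    simp only [pvMatchHeader, hget, Option.getD_some]
    rw [matchLoop_eq_foldF]
  · intro a _; rfl
  · decide

theorem detect_feedback_columns_eq_alt (headers : List String) :
    detect_feedback_columns headers = detect_feedback_columns_alt headers := by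
  simp only [detect_feedback_columns, detect_feedback_columns_alt]
  rw [pvLoopB_eq_foldl, core_eq]

-- ===== VERDICT (by name: the statement is the Claim_ definition above) =====
theorem detect_feedback_columns_spec : Claim_equal_detect_feedback_columns := by
  intro headers _
  exact detect_feedback_columns_eq_alt headers
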